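-- pv_equiv track=rewrite | github.com/Nkzono99/BEACH | beach/fortran_results/plotting.py | _labels_from_kinds
-- ===== SOURCE A (Python) =====
-- from collections import Counter
-- from typing import Iterable, Mapping
--
-- def _labels_from_kinds(kinds: Iterable[str]) -> list[str]:
--     normalized = [str(kind).strip().lower() or "mesh" for kind in kinds]
--     totals = Counter(normalized)
--     seen: Counter[str] = Counter()
--     labels: list[str] = []
--     for kind in normalized:
--         seen[kind] += 1
--         if totals[kind] == 1:
--             labels.append(kind)
--         else:
--             labels.append(f"{kind}{seen[kind]}")
--     return labels
-- ===== SOURCE B (Python) =====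
-- def _labels_from_kinds(kinds):
--     normalized = [str(kind).strip().lower() or "mesh" for kind in kinds]
--     groups = {}
--     for i, kind in enumerate(normalized):
--         groups.setdefault(kind, []).append(i)
--     labels = [""] * len(normalized)
--     for kind, idxs in groups.items():
--         if len(idxs) == 1:
--             labels[idxs[0]] = kind
--         else:
--             for n, i in enumerate(idxs, 1):
--                 labels[i] = f"{kind}{n}"
--     return labels
-- ===== Notes on version B (the rewrite author's own statement) =====
-- stated objective: alternative
-- what changed: Replaces A's single pass with two running Counters by a group/index table: B buckets the indices of each normalized kind into a dict, allocates the result list, and fills it group by group (plain kind for singleton groups, kind+1-based rank otherwise).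
import Mathlib
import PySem

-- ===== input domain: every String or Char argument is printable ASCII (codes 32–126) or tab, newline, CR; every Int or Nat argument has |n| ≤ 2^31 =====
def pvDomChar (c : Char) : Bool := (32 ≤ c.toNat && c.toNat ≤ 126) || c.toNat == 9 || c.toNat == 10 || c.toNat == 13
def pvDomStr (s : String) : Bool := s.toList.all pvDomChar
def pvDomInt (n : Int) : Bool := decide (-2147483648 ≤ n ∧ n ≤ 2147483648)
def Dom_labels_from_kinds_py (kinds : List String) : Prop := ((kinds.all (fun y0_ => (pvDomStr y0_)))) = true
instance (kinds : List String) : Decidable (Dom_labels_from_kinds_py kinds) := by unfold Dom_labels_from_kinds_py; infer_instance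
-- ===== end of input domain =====

-- B replaces A's single pass with running counters by a group/index table: it buckets the
-- indices of each normalized kind into a dict, allocates the result, and fills it group by
-- group (alternative decomposition, similar cost).

-- shared normalization: str(kind).strip().lower() or "mesh"
def pvNorm (s : String) : String :=
  let t := PySem.Str.lower (PySem.Str.strip s)
  if t = "" then "mesh" else t

-- ===== PORT A =====
def labels_from_kinds_py (kinds : List String) : List String :=
  let normalized := kinds.map pvNorm
  let totals := PySem.Dict.counter normalized
  (normalized.foldl
    (fun (s : PySem.Dict String Int × List String) kind =>
      let seen := s.1.modify kind 0 (· + 1)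
      if totals.getD kind 0 == 1 then (seen, s.2 ++ [kind])
      else (seen, s.2 ++ [kind ++ PySem.Int.toStr (seen.getD kind 0)]))
    (PySem.Dict.empty, [])).2

-- ===== PORT B =====
-- body of B's second loop: fill the slots of one group (kind, its index list)
def pvFillGroup (labels : List String) (kv : String × List Int) : List String :=
  if PySem.List.len kv.2 == 1 then
    PySem.List.pySetD labels (PySem.List.pyGetD kv.2 0 0) kv.1
  else
    (PySem.List.enumerate kv.2 1).foldl
      (fun l p => PySem.List.pySetD l p.2 (kv.1 ++ PySem.Int.toStr p.1)) labels

def labels_from_kinds_py_alt (kinds : List String) : List String :=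
  let normalized := kinds.map pvNorm
  let groups := (PySem.List.enumerate normalized 0).foldl
    (fun (d : PySem.Dict String (List Int)) p => d.modify p.2 [] (fun l => l ++ [p.1]))
    PySem.Dict.empty
  groups.items.foldl pvFillGroup (List.replicate normalized.length "")

-- ===== PRECONDITION & SPEC =====
def Spec_labels_from_kinds_py (kinds : List String) (out : List String) : Prop := out = labels_from_kinds_py_alt kinds
instance (kinds : List String) (out : List String) : Decidable (Spec_labels_from_kinds_py kinds out) := by unfold Spec_labels_from_kinds_py; infer_instance

-- ===== CLAIM (what is proved, stated in full; the proofs are below) =====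
def Claim_equal_labels_from_kinds_py : Prop := ∀ (kinds : List String), Dom_labels_from_kinds_py kinds → Spec_labels_from_kinds_py kinds (labels_from_kinds_py kinds)

-- ===== LEMMAS AND PROOFS =====

-- the label both programs produce at index i of the normalized list ns
def pvLabelAt (ns : List String) (i : Nat) : String :=
  let k := ns.getD i ""
  if ns.count k == 1 then k
  else k ++ PySem.Int.toStr (((ns.take (i + 1)).count k : Int))

-- ---------- A side (characterisation of A's loop) ----------

def pvASpec (tot : PySem.Dict String Int) : List String → PySem.Dict String Int → List String
  | [], _ => []
  | k :: t, d =>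
    (if tot.getD k 0 == 1 then k
     else k ++ PySem.Int.toStr ((d.modify k 0 (· + 1)).getD k 0))
      :: pvASpec tot t (d.modify k 0 (· + 1))

lemma pvA_loop (tot : PySem.Dict String Int) (l : List String) :
    ∀ (d : PySem.Dict String Int) (acc : List String),
    (l.foldl
      (fun (s : PySem.Dict String Int × List String) kind =>
        let seen := s.1.modify kind 0 (· + 1)
        if tot.getD kind 0 == 1 then (seen, s.2 ++ [kind])
        else (seen, s.2 ++ [kind ++ PySem.Int.toStr (seen.getD kind 0)]))
      (d, acc)).2 = acc ++ pvASpec tot l d := by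
  induction l with
  | nil => intro d acc; simp [pvASpec]
  | cons k t ih =>
    intro d acc
    simp only [List.foldl_cons]
    split_ifs with h <;> rw [ih] <;> simp [pvASpec, h]

lemma pvASpec_eq (tot : PySem.Dict String Int) (l : List String) :
    ∀ d : PySem.Dict String Int,
    pvASpec tot l d = (List.range l.length).map (fun i =>
      let k := l.getD i ""
      if tot.getD k 0 == 1 then k
      else k ++ PySem.Int.toStr (d.getD k 0 + ((l.take (i + 1)).count k : Int))) := by
  induction l with
  | nil => intro d; simp [pvASpec]
  | cons x t ih =>
    intro d
    rw [pvASpec, List.length_cons, List.range_succ_eq_map, List.map_cons, List.map_map, ih]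
    congr 1
    · simp [PySem.Dict.getD_modify_self]
    · apply List.map_congr_left
      intro i _
      simp only [Function.comp_apply, Nat.succ_eq_add_one, List.getD_cons_succ,
        List.take_succ_cons, List.count_cons]
      split_ifs with htot hx
      · rfl
      · have hk : t.getD i "" = x := (beq_iff_eq.mp hx).symm
        congr 2
        rw [PySem.Dict.getD_modify, if_pos hk, hk]
        push_cast; ring
      · have hk : ¬ t.getD i "" = x := fun h => hx (beq_iff_eq.mpr h.symm)
        congr 2
        rw [PySem.Dict.getD_modify, if_neg hk]
        push_cast; ring

lemma pvCond_eq (n : Nat) : (((n : Int) == 1) = (n == 1)) := by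
  by_cases h : n = 1
  · subst h; rfl
  · have h1 : ¬((n : Int) = 1) := by omega
    simp [h, h1]

-- ---------- B side ----------

-- the (Nat) indices at which kind k occurs in ns
def pvJ (ns : List String) (k : String) : List Nat :=
  (List.range ns.length).filter (fun m => ns.getD m "" == k)

lemma pvJ_mem (ns : List String) (k : String) (i : Nat) :
    i ∈ pvJ ns k ↔ i < ns.length ∧ ns.getD i "" = k := by
  simp [pvJ]

-- prefix counts: filtered range prefix lengths are counts of take
lemma pvPrefix_count (ns : List String) (k : String) :
    ∀ i, i ≤ ns.length →
      ((List.range i).filter (fun m => ns.getD m "" == k)).length = (ns.take i).count k := by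
  intro i
  induction i with
  | zero => intro _; simp
  | succ i ih =>
    intro h
    have hi : i < ns.length := by omega
    rw [List.range_succ, List.filter_append, List.length_append, ih (by omega),
        List.take_add_one, List.count_append]
    have hg : ns.getD i "" = ns[i] := List.getD_eq_getElem ns "" hi
    rw [List.getElem?_eq_getElem hi]
    simp only [List.filter_cons, List.filter_nil, hg]
    by_cases hk : ns[i] = k <;> simp [hk]

lemma pvJ_length (ns : List String) (k : String) : (pvJ ns k).length = ns.count k := by
  have := pvPrefix_count ns k ns.length le_rfl
  simpa [pvJ] using this

lemma pvIdxOf_append_cons (A B : List Nat) (i : Nat) (h : i ∉ A) :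
    (A ++ i :: B).idxOf i = A.length := by
  induction A with
  | nil => simp
  | cons a t ih =>
    have ha : (a == i) = false := by
      simp only [beq_eq_false_iff_ne, ne_eq]
      exact fun e => h (e ▸ List.mem_cons_self)
    simp [List.idxOf_cons, ha, ih (fun m => h (List.mem_cons_of_mem _ m))]

lemma pvJ_idxOf (ns : List String) (k : String) (i : Nat)
    (hi : i < ns.length) (hk : ns.getD i "" = k) :
    (pvJ ns k).idxOf i + 1 = (ns.take (i + 1)).count k := by
  have hki : (ns.getD i "" == k) = true := beq_iff_eq.mpr hk
  have hn : ns.length = (i + 1) + (ns.length - (i + 1)) := by omega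
  have hsplit : pvJ ns k
      = ((List.range i).filter (fun m => ns.getD m "" == k)) ++ i ::
        ((List.map (fun x => (i+1) + x) (List.range (ns.length - (i+1)))).filter
          (fun m => ns.getD m "" == k)) := by
    rw [pvJ, hn, List.range_add, List.filter_append, List.range_succ, List.filter_append]
    simp only [List.filter_cons, List.filter_nil, hki, if_true]
    simp
  have hA : i ∉ (List.range i).filter (fun m => ns.getD m "" == k) := by
    intro hmem
    have := List.mem_range.mp (List.mem_of_mem_filter hmem)
    omega
  rw [hsplit, pvIdxOf_append_cons _ _ _ hA,
     ← pvPrefix_count ns k (i+1) (by omega), List.range_succ, List.filter_append,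
     List.length_append]
  simp only [List.filter_cons, List.filter_nil, hki, if_true]
  simp

-- inner fill loop: writes k++str(c+rank) at each index of l
lemma pvInner_fill (k : String) :
    ∀ (l : List Nat) (c : Int) (L : List String), l.Nodup → (∀ j ∈ l, j < L.length) →
    ∀ i : Nat,
    ((PySem.List.enumerate (l.map (fun m : Nat => (m : Int))) c).foldl
      (fun acc p => PySem.List.pySetD acc p.2 (k ++ PySem.Int.toStr p.1)) L).getD i ""
    = if i ∈ l then k ++ PySem.Int.toStr (c + l.idxOf i) else L.getD i "" := by
  intro l
  induction l with
  | nil => intro c L _ _ i; simp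
  | cons j t ih =>
    intro c L hnd hb i
    simp only [List.map_cons, PySem.List.enumerate_cons, List.foldl_cons]
    rw [PySem.List.pySetD_natCast]
    have hjL : j < L.length := hb j List.mem_cons_self
    have hndt : t.Nodup := hnd.of_cons
    have hjt : j ∉ t := (List.nodup_cons.mp hnd).1
    rw [ih (c+1) (L.set j (k ++ PySem.Int.toStr c)) hndt
        (fun x hx => by rw [List.length_set]; exact hb x (List.mem_cons_of_mem _ hx)) i]
    by_cases hit : i ∈ t
    · have hij : i ≠ j := fun e => hjt (e ▸ hit)
      have hji : (j == i) = false := by simp [Ne.symm hij]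
      rw [if_pos hit, if_pos (List.mem_cons_of_mem _ hit), List.idxOf_cons, hji]
      simp only [cond_false]
      have harg : c + 1 + (t.idxOf i : Int) = c + ((t.idxOf i + 1 : Nat) : Int) := by
        push_cast; ring
      rw [harg]
    · by_cases hij : i = j
      · subst hij
        rw [if_neg hit, if_pos List.mem_cons_self, List.idxOf_cons]
        simp only [BEq.rfl, cond_true, Nat.cast_zero, add_zero]
        simp [List.getD, List.getElem?_set_self hjL]
      · rw [if_neg hit, if_neg (by simp [hij, hit])]
        simp [List.getD, List.getElem?_set_ne (Ne.symm hij)]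

lemma pvInner_fill_length (k : String) :
    ∀ (l : List Int) (c : Int) (L : List String),
    ((PySem.List.enumerate l c).foldl
      (fun acc p => PySem.List.pySetD acc p.2 (k ++ PySem.Int.toStr p.1)) L).length = L.length := by
  intro l
  induction l with
  | nil => intro c L; simp [PySem.List.enumerate]
  | cons x t ih =>
    intro c L
    simp only [PySem.List.enumerate_cons, List.foldl_cons]
    rw [ih]
    simp [PySem.List.length_pySetD]

lemma pvFillGroup_length (L : List String) (kv : String × List Int) :
    (pvFillGroup L kv).length = L.length := by
  unfold pvFillGroup
  split_ifs
  · simp [PySem.List.length_pySetD]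
  · exact pvInner_fill_length _ _ _ _

lemma pvJ_nodup (ns : List String) (k : String) : (pvJ ns k).Nodup :=
  List.Nodup.filter _ (List.nodup_range)

-- one group fill: positions of kind k get their final label, others untouched
lemma pvFillGroup_getD (ns : List String) (k : String) (L : List String)
    (hL : L.length = ns.length) (i : Nat) :
    (pvFillGroup L (k, (pvJ ns k).map (fun m : Nat => (m : Int)))).getD i ""
    = if i < ns.length ∧ ns.getD i "" = k then pvLabelAt ns i else L.getD i "" := by
  unfold pvFillGroup
  have hlen : PySem.List.len ((pvJ ns k).map (fun m : Nat => (m : Int)))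
      = ((ns.count k : Nat) : Int) := by
    rw [PySem.List.len_eq, List.length_map, pvJ_length]
  by_cases hc : ns.count k = 1
  · obtain ⟨j, hj⟩ := List.length_eq_one_iff.mp (by rw [pvJ_length]; exact hc)
    have hcond : (PySem.List.len ((pvJ ns k).map (fun m : Nat => (m : Int))) == 1) = true := by
      rw [hlen, hc]; rfl
    rw [if_pos hcond, hj]
    have hjJ : j ∈ pvJ ns k := by rw [hj]; exact List.mem_cons_self
    have hjn : j < ns.length := ((pvJ_mem ns k j).mp hjJ).1
    have hjk : ns.getD j "" = k := ((pvJ_mem ns k j).mp hjJ).2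
    simp only [List.map_cons, List.map_nil, PySem.List.pyGetD_zero_cons,
      PySem.List.pySetD_natCast]
    by_cases hij : i = j
    · subst hij
      rw [if_pos ⟨hjn, hjk⟩]
      simp only [pvLabelAt, hjk, hc]
      simp [List.getD, List.getElem?_set_self (hL ▸ hjn)]
    · rw [if_neg (fun ⟨h1, h2⟩ => hij (by
        have : i ∈ pvJ ns k := (pvJ_mem ns k i).mpr ⟨h1, h2⟩
        rw [hj] at this; simpa using this))]
      simp [List.getD, List.getElem?_set_ne (Ne.symm hij)]
  · have hcond : (PySem.List.len ((pvJ ns k).map (fun m : Nat => (m : Int))) == 1) = false := by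
      rw [hlen, pvCond_eq]
      simp [hc]
    rw [if_neg (by rw [hcond]; simp)]
    rw [pvInner_fill k (pvJ ns k) 1 L (pvJ_nodup ns k)
      (fun j hjm => hL ▸ ((pvJ_mem ns k j).mp hjm).1) i]
    by_cases hi : i < ns.length ∧ ns.getD i "" = k
    · rw [if_pos ((pvJ_mem ns k i).mpr hi), if_pos hi]
      simp only [pvLabelAt, hi.2]
      have harg : (1 : Int) + ((pvJ ns k).idxOf i : Int)
          = (((ns.take (i + 1)).count k : Nat) : Int) := by
        rw [← pvJ_idxOf ns k i hi.1 hi.2]; push_cast; ring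
      rw [harg]
      simp [hc]
    · rw [if_neg (fun hm => hi ((pvJ_mem ns k i).mp hm)), if_neg hi]

lemma pvGroups_getD (ns : List String) (c : String) :
    ((PySem.List.enumerate ns 0).foldl
      (fun (d : PySem.Dict String (List Int)) p => d.modify p.2 [] (fun l => l ++ [p.1]))
      PySem.Dict.empty).getD c []
    = (pvJ ns c).map (fun m : Nat => (m : Int)) := by
  have h1 : (PySem.List.enumerate ns 0).foldl
      (fun (d : PySem.Dict String (List Int)) p => d.modify p.2 [] (fun l => l ++ [p.1]))
      PySem.Dict.empty
      = ((PySem.List.enumerate ns 0).map Prod.swap).foldl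
      (fun (d : PySem.Dict String (List Int)) p => d.modify p.1 [] (fun l => l ++ [p.2]))
      PySem.Dict.empty := by
    rw [List.foldl_map]; rfl
  rw [h1, PySem.Dict.getD_foldl_modify_append]
  rw [PySem.List.enumerate_eq_map_pyRange ns "", PySem.List.len_eq,
      PySem.List.pyRange_zero_natCast]
  simp only [List.map_map, List.filter_map, pvJ]
  simp only [Function.comp_def, Prod.swap_prod_mk, PySem.List.pyGetD_natCast]
  rfl

-- the groups dict built by B's first loop
lemma pvGroups_items (ns : List String) :
    ((PySem.List.enumerate ns 0).foldl
      (fun (d : PySem.Dict String (List Int)) p => d.modify p.2 [] (fun l => l ++ [p.1]))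
      PySem.Dict.empty).items
    = (PySem.Set.ofList ns).map (fun k => (k, (pvJ ns k).map (fun m : Nat => (m : Int)))) := by
  have h1 : (PySem.List.enumerate ns 0).foldl
      (fun (d : PySem.Dict String (List Int)) p => d.modify p.2 [] (fun l => l ++ [p.1]))
      PySem.Dict.empty
      = ((PySem.List.enumerate ns 0).map Prod.swap).foldl
      (fun (d : PySem.Dict String (List Int)) p => d.modify p.1 [] (fun l => l ++ [p.2]))
      PySem.Dict.empty := by
    rw [List.foldl_map]; rfl
  have hkeys : (((PySem.List.enumerate ns 0).map Prod.swap).foldl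
      (fun (d : PySem.Dict String (List Int)) p => d.modify p.1 [] (fun l => l ++ [p.2]))
      PySem.Dict.empty).keys = PySem.Set.ofList ns := by
    rw [PySem.Dict.keys_foldl_modify_key _ Prod.fst [] (fun _ p => (fun l => l ++ [p.2]))]
    rw [List.map_map]
    have hc : (PySem.List.enumerate ns 0).map (Prod.fst ∘ Prod.swap)
        = (PySem.List.enumerate ns 0).map (fun p => p.2) := rfl
    rw [hc, PySem.List.map_snd_enumerate]
    rfl
  have hnd : (((PySem.List.enumerate ns 0).map Prod.swap).foldl
      (fun (d : PySem.Dict String (List Int)) p => d.modify p.1 [] (fun l => l ++ [p.2]))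
      PySem.Dict.empty).keys.Nodup := by
    apply PySem.Dict.nodup_keys_foldl_modify_key _ Prod.fst [] (fun _ p => (fun l => l ++ [p.2]))
    simp
  rw [h1, PySem.Dict.items_eq_map_keys _ hnd [], hkeys]
  apply List.map_congr_left
  intro k _
  rw [← pvGroups_getD ns k, h1]

-- outer fold over the groups
lemma pvOuter_fill (ns : List String) :
    ∀ (ks : List String) (L : List String), L.length = ns.length →
    ((ks.foldl (fun L k => pvFillGroup L (k, (pvJ ns k).map (fun m : Nat => (m : Int)))) L).length = ns.length ∧
     ∀ i : Nat,
      (ks.foldl (fun L k => pvFillGroup L (k, (pvJ ns k).map (fun m : Nat => (m : Int)))) L).getD i ""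
      = if i < ns.length ∧ ns.getD i "" ∈ ks then pvLabelAt ns i else L.getD i "") := by
  intro ks
  induction ks with
  | nil => intro L hL; simp [hL]
  | cons k t ih =>
    intro L hL
    simp only [List.foldl_cons]
    obtain ⟨hlen, hget⟩ := ih (pvFillGroup L (k, (pvJ ns k).map (fun m : Nat => (m : Int))))
      (by rw [pvFillGroup_length]; exact hL)
    refine ⟨hlen, fun i => ?_⟩
    rw [hget i, pvFillGroup_getD ns k L hL i]
    simp only [List.mem_cons]
    split_ifs <;> first | rfl | tauto

lemma pvB_eq (kinds : List String) :
    labels_from_kinds_py_alt kinds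
    = (List.range (kinds.map pvNorm).length).map (pvLabelAt (kinds.map pvNorm)) := by
  simp only [labels_from_kinds_py_alt]
  rw [pvGroups_items, List.foldl_map]
  obtain ⟨hlen, hget⟩ := pvOuter_fill (kinds.map pvNorm) (PySem.Set.ofList (kinds.map pvNorm))
    (List.replicate (kinds.map pvNorm).length "") (by simp)
  apply List.ext_getElem
  · rw [hlen]; simp
  · intro i h1 h2
    have hi : i < (kinds.map pvNorm).length := by rw [hlen] at h1; exact h1
    have hmem : (kinds.map pvNorm).getD i "" ∈ PySem.Set.ofList (kinds.map pvNorm) := by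
      rw [PySem.Set.mem_ofList, List.getD_eq_getElem _ "" hi]
      exact List.getElem_mem hi
    have := hget i
    rw [List.getD_eq_getElem _ "" h1, if_pos ⟨hi, hmem⟩] at this
    rw [this]
    simp

theorem labels_from_kinds_py_spec : Claim_equal_labels_from_kinds_py := by
  intro kinds _
  unfold Spec_labels_from_kinds_py labels_from_kinds_py
  rw [pvB_eq, pvA_loop, pvASpec_eq]
  simp only [List.nil_append]
  apply List.map_congr_left
  intro i _
  unfold pvLabelAt
  rw [PySem.Dict.getD_counter, PySem.Dict.getD_empty, pvCond_eq, zero_add]
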